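-- pv_equiv track=rewrite | github.com/boona13/ghost | ghost_loop.py | _summarize_from_logs
-- ===== SOURCE A (Python) =====
-- def _summarize_from_logs(messages):
--     """Last-resort: extract the last meaningful tool result as the response."""
--     for msg in reversed(messages):
--         if msg.get("role") == "tool":
--             content = (msg.get("content") or "").strip()
--             if content and len(content) > 20 and not content.startswith("OK, continuing"):
--                 return content
--         if msg.get("role") == "assistant":
--             content = msg.get("content", "")
--             if isinstance(content, str) and content.strip():
--                 return content.strip()
--     return "(Task completed — results were delivered through tool actions above)"
-- ===== SOURCE B (Python) =====
-- def _summarize_from_logs(messages):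
--     """Forward single pass: keep the last meaningful tool/assistant content."""
--     result = "(Task completed — results were delivered through tool actions above)"
--     for msg in messages:
--         role = msg.get("role")
--         if role == "tool":
--             content = (msg.get("content") or "").strip()
--             if content and len(content) > 20 and not content.startswith("OK, continuing"):
--                 result = content
--         elif role == "assistant":
--             content = msg.get("content", "")
--             if isinstance(content, str) and content.strip():
--                 result = content.strip()
--     return result
-- ===== Notes on version B (the rewrite author's own statement) =====
-- stated objective: alternative
-- what changed: Replaced the reverse scan with early return by a forward single pass that accumulates the last matching content and returns it after the loop.
import Mathlib
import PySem

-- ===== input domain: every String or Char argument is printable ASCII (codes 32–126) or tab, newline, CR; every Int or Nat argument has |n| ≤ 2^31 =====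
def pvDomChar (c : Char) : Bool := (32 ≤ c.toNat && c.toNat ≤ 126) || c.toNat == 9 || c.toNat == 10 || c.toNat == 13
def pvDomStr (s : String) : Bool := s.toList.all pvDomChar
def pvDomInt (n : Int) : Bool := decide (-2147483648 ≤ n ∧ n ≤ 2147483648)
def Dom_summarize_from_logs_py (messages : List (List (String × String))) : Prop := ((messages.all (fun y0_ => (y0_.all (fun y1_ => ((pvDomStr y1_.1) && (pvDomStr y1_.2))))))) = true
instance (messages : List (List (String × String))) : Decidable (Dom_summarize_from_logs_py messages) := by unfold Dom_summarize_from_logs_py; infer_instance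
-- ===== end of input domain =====

-- B replaces A's reverse scan with early return by a forward fold that keeps the last matching content (alternative decomposition, same cost).

-- ===== PORT A =====
-- literal transliteration of A's reverse loop with early returns
def summAGo : List (List (String × String)) → String
  | [] => "(Task completed — results were delivered through tool actions above)"
  | msg :: rest =>
    let toolContent := PySem.Str.strip ((List.lookup "content" msg).getD "")
    if List.lookup "role" msg = some "tool" ∧ toolContent ≠ "" ∧
       PySem.Str.len toolContent > 20 ∧
       PySem.Str.startswith toolContent "OK, continuing" = false then
      toolContent
    else
      let asstContent := PySem.Str.strip ((List.lookup "content" msg).getD "")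
      if List.lookup "role" msg = some "assistant" ∧ asstContent ≠ "" then
        asstContent
      else summAGo rest

def summarize_from_logs_py (messages : List (List (String × String))) : String :=
  summAGo messages.reverse

-- ===== PORT B =====
-- one step of B's forward loop: overwrite the accumulator on a match
def summStep (acc : String) (msg : List (String × String)) : String :=
  let role := List.lookup "role" msg
  if role = some "tool" then
    let content := PySem.Str.strip ((List.lookup "content" msg).getD "")
    if content ≠ "" ∧ PySem.Str.len content > 20 ∧
       PySem.Str.startswith content "OK, continuing" = false then content
    else acc
  else if role = some "assistant" then
    let content := PySem.Str.strip ((List.lookup "content" msg).getD "")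
    if content ≠ "" then content else acc
  else acc

def summarize_from_logs_py_alt (messages : List (List (String × String))) : String :=
  messages.foldl summStep "(Task completed — results were delivered through tool actions above)"

-- ===== PRECONDITION & SPEC =====
def Spec_summarize_from_logs_py (messages : List (List (String × String))) (out : String) : Prop := out = summarize_from_logs_py_alt messages
instance (messages : List (List (String × String))) (out : String) : Decidable (Spec_summarize_from_logs_py messages out) := by unfold Spec_summarize_from_logs_py; infer_instance

-- ===== CLAIM (what is proved, stated in full; the proofs are below) =====
def Claim_equal_summarize_from_logs_py : Prop := ∀ (messages : List (List (String × String))), Dom_summarize_from_logs_py messages → Spec_summarize_from_logs_py messages (summarize_from_logs_py messages)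

-- ===== LEMMAS AND PROOFS =====

-- the per-message "meaningful content" both loops test for
def matchMsg (msg : List (String × String)) : Option String :=
  let c := PySem.Str.strip ((List.lookup "content" msg).getD "")
  if List.lookup "role" msg = some "tool" ∧ c ≠ "" ∧
     PySem.Str.len c > 20 ∧ PySem.Str.startswith c "OK, continuing" = false then some c
  else if List.lookup "role" msg = some "assistant" ∧ c ≠ "" then some c
  else none

lemma summStep_eq (acc : String) (msg : List (String × String)) :
    summStep acc msg = (matchMsg msg).getD acc := by
  unfold summStep matchMsg
  dsimp only
  split_ifs with h1 h2 h3 h4 h5 h6 h7 <;> simp_all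

lemma summAGo_cons (m : List (String × String)) (rest : List (List (String × String))) :
    summAGo (m :: rest) = (matchMsg m).getD (summAGo rest) := by
  rw [summAGo, matchMsg]
  dsimp only
  split_ifs <;> rfl

lemma summAGo_eq (l : List (List (String × String))) :
    summAGo l = (l.findSome? matchMsg).getD
      "(Task completed — results were delivered through tool actions above)" := by
  induction l with
  | nil => rfl
  | cons m rest ih =>
    rw [List.findSome?_cons, summAGo_cons, ih]
    cases matchMsg m <;> simp

lemma foldl_summStep_eq (l : List (List (String × String))) (acc : String) :
    l.foldl summStep acc = (l.reverse.findSome? matchMsg).getD acc := by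
  induction l generalizing acc with
  | nil => rfl
  | cons m rest ih =>
    rw [List.foldl_cons, ih, List.reverse_cons, List.findSome?_append]
    cases h : rest.reverse.findSome? matchMsg with
    | some c => simp
    | none => rw [summStep_eq]; cases hm : matchMsg m <;> simp [hm]

-- ===== VERDICT (by name: the statement is the Claim_ definition above) =====
theorem summarize_from_logs_py_spec : Claim_equal_summarize_from_logs_py := by
  intro messages _
  unfold Spec_summarize_from_logs_py summarize_from_logs_py summarize_from_logs_py_alt
  rw [summAGo_eq, foldl_summStep_eq]
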